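-- pv_equiv track=rewrite | github.com/ghitafilali/ece6280-crypto | Homework 2/Problem 1/problem1.py | generate_y_stream
-- ===== SOURCE A (Python) =====
-- def y_generator(y_init, y_counter, y_list):
--     """
--     Generate y from the 4 first elements y1, y2, y3, y4.
--     """
--     assert len(y_init) == 4
--     while True:
--         if y_counter < len(y_init):
--             y_counter += 1
--             yield y_list[y_counter - 1], y_counter, y_list
--         else:
--             y_list.append((y_list[y_counter - 4] + y_list[y_counter - 1]) % 2)
--             y_counter += 1
--             yield y_list[y_counter - 1], y_counter, y_list
--
-- def generate_y_stream(initial, length):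
--     """
--     Generate y stream of length length from initial state.
--     """
--     stream_list = list()
--     counter = 0
--     elt_list = list(initial)
--     for i in range(length):
--         res, counter, elt_list = y_generator(initial, counter, elt_list).__next__()
--         stream_list.append(res)
--
--     return stream_list
-- ===== SOURCE B (Python) =====
-- def generate_y_stream(initial, length):
--     """
--     Generate y stream of length length from initial state.
--     """
--     if length <= 0:
--         return []
--     assert len(initial) == 4
--     y = list(initial)
--     for n in range(4, length):
--         y.append((y[n - 4] + y[n - 1]) % 2)
--     return y[:length]
-- ===== Notes on version B (the rewrite author's own statement) =====
-- stated objective: simpler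
-- what changed: B replaces A's per-element re-created generator threading a (value, counter, list) triple with a direct loop that grows one list y by the recurrence y[n]=(y[n-4]+y[n-1])%2 and returns y[:length].
import Mathlib
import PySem

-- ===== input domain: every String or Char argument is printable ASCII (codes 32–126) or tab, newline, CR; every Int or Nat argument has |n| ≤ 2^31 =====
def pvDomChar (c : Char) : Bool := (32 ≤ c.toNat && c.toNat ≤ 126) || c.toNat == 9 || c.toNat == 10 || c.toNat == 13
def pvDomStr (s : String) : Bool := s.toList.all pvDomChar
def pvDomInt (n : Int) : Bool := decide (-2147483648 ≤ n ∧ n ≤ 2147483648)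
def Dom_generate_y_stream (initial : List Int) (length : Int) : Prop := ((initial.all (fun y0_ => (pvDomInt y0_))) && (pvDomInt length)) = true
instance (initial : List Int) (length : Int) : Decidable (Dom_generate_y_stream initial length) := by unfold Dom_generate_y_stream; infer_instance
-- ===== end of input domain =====

-- B inlines A's single-step generator into one direct list loop (same values; simpler decomposition).

-- ===== PORT A =====
-- one __next__() of y_generator(y_init, y_counter, y_list): returns (res, new counter, new list)
def yStep (y_init : List Int) (y_counter : Int) (y_list : List Int) : Int × Int × List Int :=
  if y_counter < (y_init.length : Int) then
    (PySem.List.pyGetD y_list (y_counter + 1 - 1) 0, y_counter + 1, y_list)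
  else
    let y2 := y_list ++ [PySem.Int.mod
      (PySem.List.pyGetD y_list (y_counter - 4) 0 + PySem.List.pyGetD y_list (y_counter - 1) 0) 2]
    (PySem.List.pyGetD y2 (y_counter + 1 - 1) 0, y_counter + 1, y2)

def generate_y_stream (initial : List Int) (length : Int) : List Int :=
  ((PySem.List.pyRange 0 length 1).foldl
    (fun (st : List Int × Int × List Int) _ =>
      let r := yStep initial st.2.1 st.2.2
      (st.1 ++ [r.1], r.2.1, r.2.2))
    (([] : List Int), (0 : Int), initial)).1

-- ===== PORT B =====
def generate_y_stream_alt (initial : List Int) (length : Int) : List Int :=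
  if length ≤ 0 then []
  else
    let y := (PySem.List.pyRange 4 length 1).foldl
      (fun (y : List Int) n => y ++ [PySem.Int.mod
        (PySem.List.pyGetD y (n - 4) 0 + PySem.List.pyGetD y (n - 1) 0) 2]) initial
    PySem.List.slice y none (some length)

-- ===== PRECONDITION & SPEC =====
-- A's generator asserts len(initial) == 4 whenever at least one element is drawn (length >= 1);
-- Pre_ excludes exactly those AssertionError inputs (B's assert raises there too).
def Pre_generate_y_stream (initial : List Int) (length : Int) : Prop :=
  length ≤ 0 ∨ initial.length = 4
instance (initial : List Int) (length : Int) : Decidable (Pre_generate_y_stream initial length) := by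
  unfold Pre_generate_y_stream; infer_instance

def pvWitness_generate_y_stream : List Int × Int := ([1, 0, 1, 0], 9)

def Spec_generate_y_stream (initial : List Int) (length : Int) (out : List Int) : Prop := out = generate_y_stream_alt initial length
instance (initial : List Int) (length : Int) (out : List Int) : Decidable (Spec_generate_y_stream initial length out) := by unfold Spec_generate_y_stream; infer_instance

-- ===== CLAIM (what is proved, stated in full; the proofs are below) =====
def Claim_equal_generate_y_stream : Prop := ∀ (initial : List Int) (length : Int), Dom_generate_y_stream initial length → Pre_generate_y_stream initial length → Spec_generate_y_stream initial length (generate_y_stream initial length)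

-- ===== LEMMAS AND PROOFS =====

-- reference: append one recurrence term to y
def yExtStep (y : List Int) : List Int :=
  y ++ [PySem.Int.mod
    (PySem.List.pyGetD y ((y.length : Int) - 4) 0 + PySem.List.pyGetD y ((y.length : Int) - 1) 0) 2]

-- reference: y after k appended terms
def yExt (y : List Int) : Nat → List Int
  | 0 => y
  | k + 1 => yExtStep (yExt y k)

theorem yExt_length (y : List Int) (k : Nat) : (yExt y k).length = y.length + k := by
  induction k with
  | zero => rfl
  | succ k ih => simp [yExt, yExtStep, ih]; omega

-- A's loop state after n iterations (initial of length 4)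
theorem stateA (initial : List Int) (h4 : initial.length = 4) (n : Nat) :
    (PySem.List.pyRange 0 (n : Int) 1).foldl
      (fun (st : List Int × Int × List Int) _ =>
        let r := yStep initial st.2.1 st.2.2
        (st.1 ++ [r.1], r.2.1, r.2.2))
      (([] : List Int), (0 : Int), initial)
    = ((yExt initial (n - 4)).take n, (n : Int), yExt initial (n - 4)) := by
  induction n with
  | zero => simp [PySem.List.pyRange_one_eq_nil, yExt]
  | succ n ih =>
    have h : ((n : Int) + 1) = ((n + 1 : Nat) : Int) := by push_cast; ring
    rw [show ((n + 1 : Nat) : Int) = (n : Int) + 1 by push_cast; ring,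
        PySem.List.pyRange_one_succ_right (by positivity), List.foldl_append, ih]
    simp only [List.foldl_cons, List.foldl_nil]
    by_cases hn : n < 4
    · have hlt : (n : Int) < (initial.length : Int) := by simp [h4]; omega
      have h0 : n - 4 = 0 := by omega
      have h0' : n + 1 - 4 = 0 := by omega
      simp only [yStep, hlt, if_pos, h0, h0', yExt]
      have : PySem.List.pyGetD initial ((n : Int) + 1 - 1) 0 = initial[n] := by
        rw [show (n : Int) + 1 - 1 = (n : Int) by ring]
        exact PySem.List.pyGetD_eq_getElem initial 0 (by omega) (by rw [h4]; exact_mod_cast hn)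
      rw [this]
      refine Prod.ext ?_ rfl
      simp only
      rw [List.take_add_one]
      simp [List.getElem?_eq_getElem (by omega : n < initial.length)]
    · -- n ≥ 4 : else branch
      have hlen : (yExt initial (n - 4)).length = n := by rw [yExt_length]; omega
      have hge : ¬ ((n : Int) < (initial.length : Int)) := by omega
      have hsucc : n + 1 - 4 = (n - 4) + 1 := by omega
      simp only [yStep, hge, if_neg, not_false_iff, hsucc, yExt]
      have hidx4 : (n : Int) - 4 = ((yExt initial (n - 4)).length : Int) - 4 := by rw [hlen]
      have hidx1 : (n : Int) - 1 = ((yExt initial (n - 4)).length : Int) - 1 := by rw [hlen]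
      rw [hidx4, hidx1]
      set e := yExt initial (n - 4) with he
      set v := PySem.Int.mod
        (PySem.List.pyGetD e ((e.length : Int) - 4) 0 + PySem.List.pyGetD e ((e.length : Int) - 1) 0) 2 with hv
      have hstep : yExtStep e = e ++ [v] := rfl
      rw [hstep]
      have hget : PySem.List.pyGetD (e ++ [v]) ((n : Int) + 1 - 1) 0 = v := by
        rw [show (n : Int) + 1 - 1 = ((e.length : Int)) by rw [hlen]; ring,
            show ((e.length : Int)) = ((e.length : Nat) : Int) by norm_cast]
        rw [PySem.List.pyGetD_natCast]
        simp
      rw [hget]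
      refine Prod.ext ?_ rfl
      simp only
      rw [List.take_of_length_le (by simp [hlen]), List.take_of_length_le (by simp [hlen])]

-- B's growing list equals yExt
theorem stateB (initial : List Int) (h4 : initial.length = 4) (k : Nat) :
    (PySem.List.pyRange 4 ((4 + k : Nat) : Int) 1).foldl
      (fun (y : List Int) n => y ++ [PySem.Int.mod
        (PySem.List.pyGetD y (n - 4) 0 + PySem.List.pyGetD y (n - 1) 0) 2]) initial
    = yExt initial k := by
  induction k with
  | zero => simp [PySem.List.pyRange_one_eq_nil, yExt]
  | succ k ih =>
    rw [show ((4 + (k + 1) : Nat) : Int) = ((4 + k : Nat) : Int) + 1 by push_cast; ring,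
        PySem.List.pyRange_one_succ_right (by push_cast; omega), List.foldl_append, ih]
    simp only [List.foldl_cons, List.foldl_nil, yExt, yExtStep]
    have hlen : (yExt initial k).length = 4 + k := by rw [yExt_length]; omega
    rw [show ((4 + k : Nat) : Int) - 4 = ((yExt initial k).length : Int) - 4 by rw [hlen],
        show ((4 + k : Nat) : Int) - 1 = ((yExt initial k).length : Int) - 1  by rw [hlen]]

-- ===== VERDICT (by name: the statement is the Claim_ definition above) =====
theorem generate_y_stream_spec : Claim_equal_generate_y_stream := by
  unfold Claim_equal_generate_y_stream
  intro initial length _ hpre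
  unfold Spec_generate_y_stream generate_y_stream generate_y_stream_alt
  by_cases hle : length ≤ 0
  · simp [hle, PySem.List.pyRange_one_eq_nil hle]
  · have h4 : initial.length = 4 := by
      rcases hpre with h | h
      · omega
      · exact h
    simp only [hle, if_neg, not_false_iff]
    have hn : length = ((length.toNat : Nat) : Int) := by omega
    rw [hn, stateA initial h4 length.toNat]
    by_cases hsmall : length.toNat ≤ 4
    · have h0 : length.toNat - 4 = 0 := by omega
      rw [h0]
      simp only [yExt]
      rw [PySem.List.pyRange_one_eq_nil (by omega), PySem.List.slice_to_natCast]
      simp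
    · have hk : length.toNat = 4 + (length.toNat - 4) := by omega
      rw [show ((length.toNat : Nat) : Int) = ((4 + (length.toNat - 4) : Nat) : Int) by rw [← hk]]
      rw [stateB initial h4, PySem.List.slice_to_natCast, ← hk]
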